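-- pv_equiv track=rewrite | github.com/JangoBoogaloo/LeetCodeExcercise | leetcodePython/Stack/monotonic_581.py | _getMinimumUnsortedLeftIndex
-- ===== SOURCE A (Python) =====
-- from typing import List
--
-- def _getMinimumUnsortedLeftIndex(nums: List[int]) -> int:
--     breakMonotonicIndex = len(nums)
--     for i in range(1, len(nums)):
--         if nums[i] < nums[i-1]:
--             breakMonotonicIndex = i
--             break
--
--     if breakMonotonicIndex == len(nums):
--         return len(nums)
--
--     unsortedMin = min(nums[breakMonotonicIndex:])
--
--     for left in range(len(nums)):
--         if nums[left] > unsortedMin: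
--             return left
--     return len(nums)
-- ===== SOURCE B (Python) =====
-- def _getMinimumUnsortedLeftIndex(nums):
--     # Single reverse pass keeping the running minimum of the suffix:
--     # the answer is the smallest index whose value exceeds the minimum to its right.
--     n = len(nums)
--     ans = n
--     if n >= 2:
--         m = nums[-1]
--         for i in range(n - 2, -1, -1):
--             if nums[i] > m:
--                 ans = i
--             else:
--                 m = nums[i]
--     return ans
-- ===== Notes on version B (the rewrite author's own statement) =====
-- stated objective: simpler
-- what changed: A makes three scans (find first descent, take min of the suffix slice, rescan from the left for the first element exceeding it); B is a single reverse pass keeping a running suffix minimum and recording the smallest index whose value exceeds the minimum to its right.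
import Mathlib
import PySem

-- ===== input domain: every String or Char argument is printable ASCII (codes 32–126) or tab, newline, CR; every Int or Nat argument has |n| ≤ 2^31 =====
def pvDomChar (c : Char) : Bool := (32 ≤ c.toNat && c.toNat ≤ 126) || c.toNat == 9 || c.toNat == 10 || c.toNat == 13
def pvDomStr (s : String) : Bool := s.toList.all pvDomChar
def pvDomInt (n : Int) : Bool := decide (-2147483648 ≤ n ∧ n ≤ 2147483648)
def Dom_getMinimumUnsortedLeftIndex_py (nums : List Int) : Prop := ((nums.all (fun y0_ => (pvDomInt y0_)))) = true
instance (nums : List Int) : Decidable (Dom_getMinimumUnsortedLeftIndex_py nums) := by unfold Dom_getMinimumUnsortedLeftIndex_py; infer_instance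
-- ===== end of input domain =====

-- B replaces A's three scans (first descent, min of suffix slice, left rescan) by a single
-- reverse pass with a running suffix minimum; same return value, no argument mutation (simpler).

-- ===== PORT A =====
def getMinimumUnsortedLeftIndex_py (nums : List Int) : Int :=
  let n : Int := nums.length
  let breakMonotonicIndex : Int :=
    match (PySem.List.pyRange 1 n 1).find? (fun i =>
        decide (PySem.List.pyGetD nums i 0 < PySem.List.pyGetD nums (i - 1) 0)) with
    | some i => i
    | none => n
  if breakMonotonicIndex = n then n
  else
    let unsortedMin : Int :=
      (PySem.List.min? (PySem.List.slice nums (some breakMonotonicIndex) none) (fun x => x)).getD 0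
    match (PySem.List.pyRange 0 n 1).find? (fun left =>
        decide (unsortedMin < PySem.List.pyGetD nums left 0)) with
    | some left => left
    | none => n

-- ===== PORT B =====
def getMinimumUnsortedLeftIndex_py_alt (nums : List Int) : Int :=
  let n : Int := nums.length
  if 2 ≤ n then
    ((PySem.List.pyRange (n - 2) (-1) (-1)).foldl
      (fun (st : Int × Int) i =>
        if st.2 < PySem.List.pyGetD nums i 0 then (i, st.2)
        else (st.1, PySem.List.pyGetD nums i 0))
      (n, PySem.List.pyGetD nums (-1) 0)).1
  else n

-- ===== PRECONDITION & SPEC =====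
def Spec_getMinimumUnsortedLeftIndex_py (nums : List Int) (out : Int) : Prop := out = getMinimumUnsortedLeftIndex_py_alt nums
instance (nums : List Int) (out : Int) : Decidable (Spec_getMinimumUnsortedLeftIndex_py nums out) := by unfold Spec_getMinimumUnsortedLeftIndex_py; infer_instance

-- ===== CLAIM (what is proved, stated in full; the proofs are below) =====
def Claim_equal_getMinimumUnsortedLeftIndex_py : Prop := ∀ (nums : List Int), Dom_getMinimumUnsortedLeftIndex_py nums → Spec_getMinimumUnsortedLeftIndex_py nums (getMinimumUnsortedLeftIndex_py nums)

-- ===== LEMMAS AND PROOFS =====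

-- value at a Nat index (0 outside range; all uses are in range)
def pvG (nums : List Int) (i : Nat) : Int := nums.getD i 0

-- "index i is a left boundary candidate": some element strictly to the right is smaller
def pvQ (nums : List Int) (i : Nat) : Prop :=
  ∃ m, (nums.drop (i + 1)).min? = some m ∧ m < pvG nums i

-- the common characterization of both ports' results
def pvGood (nums : List Int) (r : Int) : Prop :=
  (r = nums.length ∧ ∀ j : Nat, j < nums.length → ¬ pvQ nums j) ∨
  (∃ j : Nat, r = j ∧ j < nums.length ∧ pvQ nums j ∧ ∀ k : Nat, k < j → ¬ pvQ nums k)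

theorem pvGood_unique (nums : List Int) (r₁ r₂ : Int)
    (h₁ : pvGood nums r₁) (h₂ : pvGood nums r₂) : r₁ = r₂ := by
  rcases h₁ with ⟨e₁, a₁⟩ | ⟨j₁, e₁, hj₁, q₁, l₁⟩ <;>
    rcases h₂ with ⟨e₂, a₂⟩ | ⟨j₂, e₂, hj₂, q₂, l₂⟩
  · omega
  · exact absurd q₂ (a₁ _ hj₂)
  · exact absurd q₁ (a₂ _ hj₁)
  · rcases Nat.lt_trichotomy j₁ j₂ with h | h | h
    · exact absurd q₁ (l₂ _ h)
    · omega
    · exact absurd q₂ (l₁ _ h)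

-- generic: find? over an ascending pyRange finds the least index satisfying p
theorem pv_find?_pyRange_some (p : Int → Bool) (a b x : Int)
    (h : (PySem.List.pyRange a b 1).find? p = some x) :
    a ≤ x ∧ x < b ∧ p x = true ∧ ∀ y, a ≤ y → y < x → p y = false := by
  have main : ∀ (N : Nat) (a : Int), (b - a).toNat = N →
      (PySem.List.pyRange a b 1).find? p = some x →
      a ≤ x ∧ x < b ∧ p x = true ∧ ∀ y, a ≤ y → y < x → p y = false := by
    intro N
    induction N with
    | zero =>
      intro a hN hfind
      rw [PySem.List.pyRange_one_eq_nil (by omega)] at hfind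
      simp at hfind
    | succ n ih =>
      intro a hN hfind
      rw [PySem.List.pyRange_one_cons (by omega)] at hfind
      by_cases hpa : p a = true
      · rw [List.find?_cons_of_pos hpa] at hfind
        obtain rfl : a = x := by simpa using hfind
        exact ⟨le_refl _, by omega, hpa, fun y h1 h2 => by omega⟩
      · rw [List.find?_cons_of_neg (by simpa using hpa)] at hfind
        obtain ⟨h1, h2, h3, h4⟩ := ih (a + 1) (by omega) hfind
        refine ⟨by omega, h2, h3, fun y hy1 hy2 => ?_⟩
        rcases eq_or_lt_of_le hy1 with rfl | hlt
        · simpa using hpa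
        · exact h4 y (by omega) hy2
  exact main (b - a).toNat a rfl h

theorem pv_find?_pyRange_none (p : Int → Bool) (a b : Int)
    (h : (PySem.List.pyRange a b 1).find? p = none) :
    ∀ y, a ≤ y → y < b → p y = false := by
  intro y hy1 hy2
  have := List.find?_eq_none.1 h y (by rw [PySem.List.mem_pyRange_one]; omega)
  simpa using this

-- min facts
theorem pv_min?_spec (l : List Int) (m : Int) (h : l.min? = some m) :
    m ∈ l ∧ ∀ x ∈ l, m ≤ x := List.min?_eq_some_iff.1 h

theorem pv_min?_of_ne_nil (l : List Int) (h : l ≠ []) : ∃ m, l.min? = some m := by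
  cases l with
  | nil => simp at h
  | cons a t => exact ⟨_, rfl⟩

theorem pv_pysem_min?_id (l : List Int) : PySem.List.min? l (fun x => x) = l.min? := by
  cases l with
  | nil => simp [PySem.List.min?_eq_none_iff]
  | cons a t => rw [PySem.List.min?_id_cons]; rfl

-- membership in a drop is having a later index
theorem pv_mem_drop_iff (nums : List Int) (k : Nat) (x : Int) :
    x ∈ nums.drop k ↔ ∃ j : Nat, k ≤ j ∧ j < nums.length ∧ pvG nums j = x := by
  constructor
  · intro hx
    obtain ⟨i, hi, he⟩ := List.mem_iff_getElem.1 hx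
    have hlen : k + i < nums.length := by
      have := nums.length_drop (i := k); omega
    refine ⟨k + i, by omega, hlen, ?_⟩
    rw [← he, List.getElem_drop]
    simp [pvG, List.getD_eq_getElem?_getD, List.getElem?_eq_getElem hlen]
  · rintro ⟨j, h1, h2, rfl⟩
    rw [List.mem_iff_getElem]
    refine ⟨j - k, by have := nums.length_drop (i := k); omega, ?_⟩
    rw [List.getElem_drop]
    have : k + (j - k) = j := by omega
    simp [this, pvG, List.getD_eq_getElem?_getD, List.getElem?_eq_getElem h2]


-- Int-index access in range equals Nat-index access
theorem pv_getD_int (nums : List Int) (i : Int) (h0 : 0 ≤ i) (h1 : i < (nums.length : Int)) :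
    PySem.List.pyGetD nums i 0 = pvG nums i.toNat := by
  rw [PySem.List.pyGetD_eq_getElem nums 0 h0 (by exact_mod_cast h1)]
  simp [pvG, List.getD_eq_getElem?_getD,
    List.getElem?_eq_getElem (show i.toNat < nums.length by omega)]

-- a pairwise-nondecreasing prefix is monotone
theorem pv_mono (nums : List Int) (b : Nat)
    (hs : ∀ k : Nat, 1 ≤ k → k < b → pvG nums (k - 1) ≤ pvG nums k) :
    ∀ i j : Nat, i ≤ j → j < b → pvG nums i ≤ pvG nums j := by
  intro i j hij hj
  induction j with
  | zero => have : i = 0 := by omega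
            simp [this]
  | succ j ih =>
    rcases Nat.eq_or_lt_of_le hij with rfl | hlt
    · exact le_refl _
    · have h1 : pvG nums i ≤ pvG nums j := ih (by omega) (by omega)
      have h2 : pvG nums j ≤ pvG nums (j + 1) := by
        have := hs (j + 1) (by omega) hj
        simpa using this
      exact le_trans h1 h2

theorem pv_drop_ne_nil (nums : List Int) (k : Nat) (h : k < nums.length) :
    nums.drop k ≠ [] := by
  intro hcon
  have := congrArg List.length hcon
  simp at this
  omega

-- A's port satisfies the characterization
theorem pvA_good (nums : List Int) : pvGood nums (getMinimumUnsortedLeftIndex_py nums) := by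
  cases hfind : (PySem.List.pyRange 1 (nums.length : Int) 1).find?
      (fun i => decide (PySem.List.pyGetD nums i 0 < PySem.List.pyGetD nums (i - 1) 0)) with
  | none =>
    simp only [getMinimumUnsortedLeftIndex_py, hfind]
    have hs := pv_find?_pyRange_none _ _ _ hfind
    have hs' : ∀ k : Nat, 1 ≤ k → k < nums.length → pvG nums (k - 1) ≤ pvG nums k := by
      intro k h1 h2
      have h := hs (k : Int) (by omega) (by omega)
      simp only [decide_eq_false_iff_not, not_lt] at h
      rwa [pv_getD_int nums (k : Int) (by omega) (by omega),
        show (k : Int) - 1 = ((k - 1 : Nat) : Int) by omega,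
        pv_getD_int nums _ (by omega) (by omega), Int.toNat_natCast, Int.toNat_natCast] at h
    left
    refine ⟨rfl, ?_⟩
    rintro j hj ⟨m, hmin, hlt⟩
    obtain ⟨j', hj'1, hj'2, rfl⟩ := (pv_mem_drop_iff nums (j + 1) m).1 (pv_min?_spec _ _ hmin).1
    have := pv_mono nums nums.length hs' j j' (by omega) hj'2
    omega
  | some bI =>
    obtain ⟨hb1, hb2, hbp, hbl⟩ := pv_find?_pyRange_some _ _ _ _ hfind
    have hslice : PySem.List.slice nums (some bI) none = nums.drop bI.toNat :=
      PySem.List.slice_from nums (by omega)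
    have hbn2 : bI.toNat < nums.length := by omega
    obtain ⟨M, hM⟩ := pv_min?_of_ne_nil _ (pv_drop_ne_nil nums bI.toNat hbn2)
    have hMfacts := pv_min?_spec _ _ hM
    have hs' : ∀ k : Nat, 1 ≤ k → k < bI.toNat → pvG nums (k - 1) ≤ pvG nums k := by
      intro k h1 h2
      have h := hbl (k : Int) (by omega) (by omega)
      simp only [decide_eq_false_iff_not, not_lt] at h
      rwa [pv_getD_int nums (k : Int) (by omega) (by omega),
        show (k : Int) - 1 = ((k - 1 : Nat) : Int) by omega,
        pv_getD_int nums _ (by omega) (by omega), Int.toNat_natCast, Int.toNat_natCast] at h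
    have hdesc : pvG nums bI.toNat < pvG nums (bI.toNat - 1) := by
      have h := of_decide_eq_true hbp
      rwa [pv_getD_int nums bI (by omega) (by omega),
        show bI - 1 = ((bI.toNat - 1 : Nat) : Int) by omega,
        pv_getD_int nums _ (by omega) (by omega), Int.toNat_natCast] at h
    have hMle : M ≤ pvG nums bI.toNat :=
      hMfacts.2 _ ((pv_mem_drop_iff _ _ _).2 ⟨bI.toNat, le_refl _, hbn2, rfl⟩)
    simp only [getMinimumUnsortedLeftIndex_py, hfind, if_neg (show ¬ bI = (nums.length : Int) by omega),
      hslice, pv_pysem_min?_id, hM, Option.getD_some]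
    cases hfind2 : (PySem.List.pyRange 0 (nums.length : Int) 1).find?
        (fun left => decide (M < PySem.List.pyGetD nums left 0)) with
    | none =>
      exfalso
      have h := pv_find?_pyRange_none _ _ _ hfind2 ((bI.toNat - 1 : Nat) : Int) (by omega) (by omega)
      simp only [decide_eq_false_iff_not, not_lt] at h
      rw [pv_getD_int nums _ (by omega) (by omega), Int.toNat_natCast] at h
      omega
    | some L =>
      show pvGood nums L
      obtain ⟨hL0, hLn, hLp, hLl⟩ := pv_find?_pyRange_some _ _ _ _ hfind2
      have hLval : M < pvG nums L.toNat := by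
        have h := of_decide_eq_true hLp
        rwa [pv_getD_int nums L (by omega) (by omega)] at h
      have hLlt : L < bI := by
        by_contra hcon
        have h := hLl (bI - 1) (by omega) (by omega)
        simp only [decide_eq_false_iff_not, not_lt] at h
        rw [show bI - 1 = ((bI.toNat - 1 : Nat) : Int) by omega,
          pv_getD_int nums _ (by omega) (by omega), Int.toNat_natCast] at h
        omega
      right
      have hLn1 : L.toNat + 1 ≤ bI.toNat := by omega
      obtain ⟨m', hm'⟩ := pv_min?_of_ne_nil _ (pv_drop_ne_nil nums (L.toNat + 1) (by omega))
      have hMmem : M ∈ nums.drop (L.toNat + 1) := by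
        have hd : (nums.drop (L.toNat + 1)).drop (bI.toNat - (L.toNat + 1)) = nums.drop bI.toNat := by
          rw [List.drop_drop]
          congr 1
          omega
        refine List.mem_of_mem_drop (i := bI.toNat - (L.toNat + 1)) ?_
        rw [hd]
        exact hMfacts.1
      refine ⟨L.toNat, by omega, by omega, ⟨m', hm', ?_⟩, ?_⟩
      · have := (pv_min?_spec _ _ hm').2 _ hMmem
        omega
      · rintro k hk ⟨m'', hm'', hlt''⟩
        have hkM : pvG nums k ≤ M := by
          have h := hLl (k : Int) (by omega) (by omega)
          simp only [decide_eq_false_iff_not, not_lt] at h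
          rwa [pv_getD_int nums (k : Int) (by omega) (by omega), Int.toNat_natCast] at h
        obtain ⟨j', hj1, hj2, rfl⟩ := (pv_mem_drop_iff nums (k + 1) m'').1 (pv_min?_spec _ _ hm'').1
        by_cases hcase : j' < bI.toNat
        · have := pv_mono nums bI.toNat hs' k j' (by omega) hcase
          omega
        · have : M ≤ pvG nums j' :=
            hMfacts.2 _ ((pv_mem_drop_iff _ _ _).2 ⟨j', by omega, hj2, rfl⟩)
          omega

theorem pv_pvG_getElem (nums : List Int) (j : Nat) (h : j < nums.length) :
    nums[j] = pvG nums j := by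
  simp [pvG, List.getD_eq_getElem?_getD, List.getElem?_eq_getElem h]

theorem pv_foldl_min_comm (t : List Int) : ∀ x y : Int, t.foldl min (min x y) = min x (t.foldl min y) := by
  induction t with
  | nil => intro x y; simp
  | cons z t ih =>
    intro x y
    simp only [List.foldl_cons]
    rw [min_assoc]
    exact ih x (min y z)

theorem pv_foldl_min (t : List Int) (x m : Int) (h : t.min? = some m) :
    t.foldl min x = min x m := by
  cases t with
  | nil => simp at h
  | cons y t' =>
    have hm : m = t'.foldl min y := by
      have he : (y :: t').min? = some (t'.foldl min y) := rfl
      rw [he] at h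
      exact (Option.some.inj h).symm
    rw [List.foldl_cons, hm]
    exact pv_foldl_min_comm t' x y

theorem pv_min?_cons_drop (nums : List Int) (i : Nat) (m : Int) (hi : i < nums.length)
    (h : (nums.drop (i + 1)).min? = some m) :
    (nums.drop i).min? = some (min (pvG nums i) m) := by
  rw [← List.getElem_cons_drop hi]
  have he : (nums[i] :: nums.drop (i + 1)).min? = some ((nums.drop (i + 1)).foldl min nums[i]) := rfl
  rw [he, pv_foldl_min _ _ _ h, pv_pvG_getElem nums i hi]

-- the loop invariant carried by B's reverse fold: ans describes the least pvQ index among those already seen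
def pvInv (nums : List Int) (i : Int) (ans : Int) : Prop :=
  (ans = nums.length ∧ ∀ j : Nat, i < (j : Int) → j < nums.length → ¬ pvQ nums j) ∨
  (∃ j : Nat, ans = (j : Int) ∧ i < (j : Int) ∧ j < nums.length ∧ pvQ nums j ∧
     ∀ k : Nat, i < (k : Int) → k < j → ¬ pvQ nums k)

theorem pvB_loop (nums : List Int) :
    ∀ (N : Nat) (i ans m : Int), (i + 1).toNat = N → -1 ≤ i → i < (nums.length : Int) →
    (nums.drop (i + 1).toNat).min? = some m →
    pvInv nums i ans →
    pvGood nums (((PySem.List.pyRange i (-1) (-1)).foldl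
      (fun (st : Int × Int) i =>
        if st.2 < PySem.List.pyGetD nums i 0 then (i, st.2)
        else (st.1, PySem.List.pyGetD nums i 0)) (ans, m)).1) := by
  intro N
  induction N with
  | zero =>
    intro i ans m hN h0 h1 hmin hinv
    have hi : i = -1 := by omega
    subst hi
    rw [PySem.List.pyRange_neg_one_eq_nil (by omega)]
    simp only [List.foldl_nil]
    rcases hinv with ⟨he, hall⟩ | ⟨j, he, _, hj, hq, hleast⟩
    · exact Or.inl ⟨he, fun j hj2 => hall j (by omega) hj2⟩
    · exact Or.inr ⟨j, he, hj, hq, fun k hk => hleast k (by omega) hk⟩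
  | succ N ih =>
    intro i ans m hN h0 h1 hmin hinv
    have hi0 : 0 ≤ i := by omega
    have hiN : i.toNat < nums.length := by omega
    have e1 : (i + 1).toNat = i.toNat + 1 := by omega
    rw [e1] at hmin
    have hnotQ_or : ∀ h : ¬ m < pvG nums i.toNat, ¬ pvQ nums i.toNat := by
      intro hc hQ
      obtain ⟨mm, hmm, hlt⟩ := hQ
      rw [hmin] at hmm
      exact hc (by rw [← Option.some.inj hmm] at hlt; exact hlt)
    have hg : PySem.List.pyGetD nums i 0 = pvG nums i.toNat := pv_getD_int nums i hi0 (by omega)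
    rw [PySem.List.pyRange_neg_one_cons (show (-1 : Int) < i by omega)]
    simp only [List.foldl_cons]
    by_cases hc : m < PySem.List.pyGetD nums i 0
    · rw [if_pos hc]
      apply ih (i - 1) i m (by omega) (by omega) (by omega)
      · have e2 : i - 1 + 1 = i := by ring
        rw [e2]
        rw [pv_min?_cons_drop nums i.toNat m hiN hmin]
        rw [hg] at hc
        rw [min_eq_right (le_of_lt hc)]
      · right
        refine ⟨i.toNat, by omega, by omega, hiN, ?_, ?_⟩
        · exact ⟨m, hmin, by rw [hg] at hc; exact hc⟩
        · intro k hk1 hk2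
          exfalso
          omega
    · rw [if_neg hc]
      apply ih (i - 1) ans (PySem.List.pyGetD nums i 0) (by omega) (by omega) (by omega)
      · have e2 : i - 1 + 1 = i := by ring
        rw [e2]
        rw [pv_min?_cons_drop nums i.toNat m hiN hmin]
        rw [hg]
        rw [min_eq_left (by rw [hg] at hc; omega)]
      · have hnotQ : ¬ pvQ nums i.toNat := hnotQ_or (by rw [hg] at hc; exact hc)
        rcases hinv with ⟨he, hall⟩ | ⟨j, he, hji, hj, hq, hleast⟩
        · left
          refine ⟨he, fun j hj1 hj2 => ?_⟩
          by_cases hji : (j : Int) = i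
          · have : j = i.toNat := by omega
            rw [this]
            exact hnotQ
          · exact hall j (by omega) hj2
        · right
          refine ⟨j, he, by omega, hj, hq, fun k hk1 hk2 => ?_⟩
          by_cases hki : (k : Int) = i
          · have : k = i.toNat := by omega
            rw [this]
            exact hnotQ
          · exact hleast k (by omega) hk2

-- B's port satisfies the characterization
theorem pvB_good (nums : List Int) : pvGood nums (getMinimumUnsortedLeftIndex_py_alt nums) := by
  have hdropQ : ∀ j : Nat, j + 1 = nums.length → ¬ pvQ nums j := by
    intro j hj hQ
    obtain ⟨m, hm, _⟩ := hQ
    rw [hj, List.drop_length] at hm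
    simp at hm
  by_cases h2 : 2 ≤ (nums.length : Int)
  · simp only [getMinimumUnsortedLeftIndex_py_alt]
    rw [if_pos h2]
    have hne : nums ≠ [] := by
      intro h
      rw [h] at h2
      simp at h2
    have hlenpos : nums.length - 1 < nums.length := by omega
    have hlast : PySem.List.pyGetD nums (-1) 0 = pvG nums (nums.length - 1) := by
      rw [PySem.List.pyGetD_neg_one nums 0 hne, List.getLast_eq_getElem hne,
        pv_pvG_getElem nums _ hlenpos]
    apply pvB_loop nums (((nums.length : Int) - 2) + 1).toNat ((nums.length : Int) - 2) _ _ rfl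
      (by omega) (by omega)
    · have e : ((nums.length : Int) - 2 + 1).toNat = nums.length - 1 := by omega
      rw [e]
      have hd : nums.drop (nums.length - 1) = [nums[nums.length - 1]'hlenpos] := by
        rw [← List.getElem_cons_drop hlenpos]
        congr 1
        rw [show nums.length - 1 + 1 = nums.length by omega]
        exact List.drop_length
      rw [hd, hlast, pv_pvG_getElem nums _ hlenpos]
      rfl
    · left
      refine ⟨rfl, fun j hj1 hj2 => ?_⟩
      exact hdropQ j (by omega)
  · simp only [getMinimumUnsortedLeftIndex_py_alt]
    rw [if_neg h2]
    left
    refine ⟨rfl, fun j hj => ?_⟩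
    exact hdropQ j (by omega)

-- ===== VERDICT (by name: the statement is the Claim_ definition above) =====
theorem getMinimumUnsortedLeftIndex_py_spec : Claim_equal_getMinimumUnsortedLeftIndex_py := by
  intro nums _
  unfold Spec_getMinimumUnsortedLeftIndex_py
  exact pvGood_unique nums _ _ (pvA_good nums) (pvB_good nums)
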